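-- pv_equiv track=rewrite | github.com/Amplified-Partners/20260418-clean-build-amplified-partners | 02_build/voice-ai/ticktick_client.py | parse_priority
-- ===== SOURCE A (Python) =====
-- def parse_priority(text: str) -> int:
--     """Parse priority from text. Returns 0, 1, 3, or 5."""
--     text = text.lower()
--
--     if any(word in text for word in ["urgent", "asap", "critical", "high priority"]):
--         return 5
--     if any(word in text for word in ["important", "medium priority"]):
--         return 3
--     if any(word in text for word in ["low priority", "whenever", "eventually"]):
--         return 1
--
--     return 0
-- ===== SOURCE B (Python) =====
-- _PRIORITY_KEYWORDS = {
--     "urgent": 5, "asap": 5, "critical": 5, "high priority": 5,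
--     "important": 3, "medium priority": 3,
--     "low priority": 1, "whenever": 1, "eventually": 1,
-- }
--
--
-- def parse_priority(text: str) -> int:
--     """Parse priority from text. Returns 0, 1, 3, or 5."""
--     t = text.lower()
--     best = 0
--     for word, prio in _PRIORITY_KEYWORDS.items():
--         if word in t and prio > best:
--             best = prio
--     return best
-- ===== Notes on version B (the rewrite author's own statement) =====
-- stated objective: simpler
-- what changed: Replaces the three ordered short-circuit any()-branches with a single keyword-to-priority table and one running-max pass over all keywords that occur as substrings (default 0).
import Mathlib
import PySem

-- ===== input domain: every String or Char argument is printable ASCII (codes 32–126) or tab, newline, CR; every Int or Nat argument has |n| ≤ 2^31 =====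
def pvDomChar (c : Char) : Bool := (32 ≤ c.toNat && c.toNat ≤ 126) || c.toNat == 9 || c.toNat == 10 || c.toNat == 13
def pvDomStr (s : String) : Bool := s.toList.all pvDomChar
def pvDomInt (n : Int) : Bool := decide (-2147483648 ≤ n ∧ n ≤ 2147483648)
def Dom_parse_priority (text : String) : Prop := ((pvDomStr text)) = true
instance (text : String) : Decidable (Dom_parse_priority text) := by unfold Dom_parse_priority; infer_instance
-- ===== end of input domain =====

-- B replaces the three ordered short-circuit branches with one keyword→priority table and a running-max pass (objective: simpler).

-- ===== PORT A =====
def parse_priority (text : String) : Int :=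
  let t := PySem.Str.lower text
  if ["urgent", "asap", "critical", "high priority"].any (fun w => PySem.Str.isIn w t) then 5
  else if ["important", "medium priority"].any (fun w => PySem.Str.isIn w t) then 3
  else if ["low priority", "whenever", "eventually"].any (fun w => PySem.Str.isIn w t) then 1
  else 0

-- ===== PORT B =====
def pvPriorityKeywords : List (String × Int) :=
  [("urgent", 5), ("asap", 5), ("critical", 5), ("high priority", 5),
   ("important", 3), ("medium priority", 3),
   ("low priority", 1), ("whenever", 1), ("eventually", 1)]

def parse_priority_alt (text : String) : Int :=
  let t := PySem.Str.lower text
  pvPriorityKeywords.foldl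
    (fun best wp => if PySem.Str.isIn wp.1 t && decide (best < wp.2) then wp.2 else best) 0

-- ===== PRECONDITION & SPEC =====
def Spec_parse_priority (text : String) (out : Int) : Prop := out = parse_priority_alt text
instance (text : String) (out : Int) : Decidable (Spec_parse_priority text out) := by unfold Spec_parse_priority; infer_instance

-- ===== CLAIM (what is proved, stated in full; the proofs are below) =====
def Claim_equal_parse_priority : Prop := ∀ (text : String), Dom_parse_priority text → Spec_parse_priority text (parse_priority text)

-- ===== LEMMAS AND PROOFS =====

-- the whole equivalence over the nine "keyword occurs" booleans, checked by decide
theorem pv_key (b1 b2 b3 b4 b5 b6 b7 b8 b9 : Bool) :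
    (if b1 || (b2 || (b3 || (b4 || false))) then (5 : Int)
     else if b5 || (b6 || false) then 3
     else if b7 || (b8 || (b9 || false)) then 1
     else 0)
    = [(b1, (5 : Int)), (b2, 5), (b3, 5), (b4, 5), (b5, 3), (b6, 3),
       (b7, 1), (b8, 1), (b9, 1)].foldl
        (fun best bp => if bp.1 && decide (best < bp.2) then bp.2 else best) 0 := by
  revert b1 b2 b3 b4 b5 b6 b7 b8 b9
  decide

-- ===== VERDICT (by name: the statement is the Claim_ definition above) =====
set_option maxHeartbeats 1600000 in
theorem parse_priority_spec : Claim_equal_parse_priority := by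
  intro text _
  exact pv_key
    (PySem.Str.isIn "urgent" (PySem.Str.lower text))
    (PySem.Str.isIn "asap" (PySem.Str.lower text))
    (PySem.Str.isIn "critical" (PySem.Str.lower text))
    (PySem.Str.isIn "high priority" (PySem.Str.lower text))
    (PySem.Str.isIn "important" (PySem.Str.lower text))
    (PySem.Str.isIn "medium priority" (PySem.Str.lower text))
    (PySem.Str.isIn "low priority" (PySem.Str.lower text))
    (PySem.Str.isIn "whenever" (PySem.Str.lower text))
    (PySem.Str.isIn "eventually" (PySem.Str.lower text))
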